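-- pv_equiv track=rewrite | github.com/manyisanewton/sales_performance_dashboard | sales_performance_dashboard/sales_performance_dashboard/dashboard_chart_source/department_sales_order_trend/department_sales_order_trend.py | _sparsify_month_labels
-- ===== SOURCE A (Python) =====
-- def _sparsify_month_labels(labels):
--     total = len(labels)
--     if total <= 12:
--         return labels
--
--     if total <= 16:
--         step = 2
--     elif total <= 24:
--         step = 3
--     else:
--         step = 4
--
--     return [label if (idx % step == 0 or idx == total - 1) else "" for idx, label in enumerate(labels)]
-- ===== SOURCE B (Python) =====
-- def _sparsify_month_labels(labels):
--     total = len(labels)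
--     if total <= 12:
--         return labels
--
--     if total <= 16:
--         step = 2
--     elif total <= 24:
--         step = 3
--     else:
--         step = 4
--
--     out = []
--     it = iter(labels)
--     for label in it:
--         out.append(label)              # keep the head of each chunk
--         for _ in range(step - 1):      # blank out the rest of the chunk
--             if next(it, None) is None:
--                 break
--             out.append("")
--     out[-1] = labels[-1]
--     return out
-- ===== Notes on version B (the rewrite author's own statement) =====
-- stated objective: alternative
-- what changed: B consumes the list chunk by chunk through an iterator (keep the head of each step-sized chunk, emit blanks while draining the rest of the chunk, then overwrite the last slot), with no enumerate, no modulo test and no index arithmetic over positions.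
import Mathlib
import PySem

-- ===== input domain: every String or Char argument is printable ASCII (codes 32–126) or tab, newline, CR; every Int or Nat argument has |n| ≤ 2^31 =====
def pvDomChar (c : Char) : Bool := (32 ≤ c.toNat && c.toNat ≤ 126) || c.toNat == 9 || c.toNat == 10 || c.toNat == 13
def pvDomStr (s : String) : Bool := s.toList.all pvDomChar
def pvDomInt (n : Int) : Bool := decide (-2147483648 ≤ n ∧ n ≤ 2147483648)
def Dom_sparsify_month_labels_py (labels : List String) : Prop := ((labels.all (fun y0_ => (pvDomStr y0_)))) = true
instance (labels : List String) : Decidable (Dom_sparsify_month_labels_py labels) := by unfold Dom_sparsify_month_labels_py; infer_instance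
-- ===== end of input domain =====

-- B consumes the list chunk by chunk (head of each step-sized chunk kept, blanks for the
-- rest, last slot overwritten) instead of testing idx % step at every enumerated position;
-- same O(n) cost (objective: alternative).

-- ===== PORT A =====
def sparsify_month_labels_py (labels : List String) : List String :=
  let total : Int := labels.length
  if total ≤ 12 then labels
  else
    let step : Int := if total ≤ 16 then 2 else if total ≤ 24 then 3 else 4
    (PySem.List.enumerate labels 0).map (fun p =>
      if PySem.Int.mod p.1 step == 0 || p.1 == total - 1 then p.2 else "")

-- ===== PORT B =====
-- Source B's iterator loop: append the chunk head, then drain and blank up to step-1 further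
-- elements (min (step-1) xs.length of them), and continue on what remains (xs.drop (step-1))
def pvChunkGo (step : Nat) : List String → List String
  | [] => []
  | x :: xs => x :: (List.replicate (min (step - 1) xs.length) "" ++ pvChunkGo step (xs.drop (step - 1)))
termination_by l => l.length
decreasing_by simp only [List.length_drop, List.length_cons]; omega

-- out[-1] = labels[-1]: out is nonempty here, so this is set at index out.length - 1
def sparsify_month_labels_py_alt (labels : List String) : List String :=
  let total : Int := labels.length
  if total ≤ 12 then labels
  else
    let step : Nat := if total ≤ 16 then 2 else if total ≤ 24 then 3 else 4
    let out := pvChunkGo step labels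
    out.set (out.length - 1) (labels.getD (labels.length - 1) "")

-- ===== PRECONDITION & SPEC =====
def Spec_sparsify_month_labels_py (labels : List String) (out : List String) : Prop := out = sparsify_month_labels_py_alt labels
instance (labels : List String) (out : List String) : Decidable (Spec_sparsify_month_labels_py labels out) := by unfold Spec_sparsify_month_labels_py; infer_instance

-- ===== CLAIM (what is proved, stated in full; the proofs are below) =====
def Claim_equal_sparsify_month_labels_py : Prop := ∀ (labels : List String), Dom_sparsify_month_labels_py labels → Spec_sparsify_month_labels_py labels (sparsify_month_labels_py labels)

-- ===== LEMMAS AND PROOFS =====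

lemma pvChunkGo_length (step : Nat) (rest : List String) :
    (pvChunkGo step rest).length = rest.length := by
  induction rest using pvChunkGo.induct step with
  | case1 => rw [pvChunkGo]
  | case2 x xs ih =>
    rw [pvChunkGo]
    simp only [List.length_cons, List.length_append, List.length_replicate, ih, List.length_drop]
    omega

lemma pvChunkGo_getElem? (step : Nat) (hstep : 1 ≤ step) (rest : List String) (j : Nat) :
    (pvChunkGo step rest)[j]? =
      if j % step = 0 then rest[j]?
      else if j < rest.length then some "" else none := by
  induction rest using pvChunkGo.induct step generalizing j with
  | case1 => simp [pvChunkGo]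
  | case2 x xs ih =>
    rw [pvChunkGo]
    match j with
    | 0 => simp [Nat.zero_mod]
    | Nat.succ k =>
      simp only [List.getElem?_cons_succ, List.length_cons]
      rw [List.getElem?_append, List.length_replicate]
      by_cases hk : k < min (step - 1) xs.length
      · have hk1 : k < step - 1 := lt_of_lt_of_le hk (min_le_left _ _)
        have hk2 : k < xs.length := lt_of_lt_of_le hk (min_le_right _ _)
        rw [if_pos hk, List.getElem?_replicate, if_pos hk,
          if_neg (by rw [Nat.mod_eq_of_lt (by omega)]; omega), if_pos (by omega)]
      · rw [if_neg hk, ih, List.getElem?_drop, List.length_drop]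
        by_cases hxs : xs.length ≤ step - 1
        · have hm : min (step - 1) xs.length = xs.length := by omega
          rw [hm] at hk ⊢
          have h1 : xs[step - 1 + (k - xs.length)]? = none :=
            List.getElem?_eq_none (by omega)
          have h2 : xs[k]? = none := List.getElem?_eq_none (by omega)
          rw [h1, h2, show xs.length - (step - 1) = 0 from by omega,
            if_neg (Nat.not_lt_zero _), ite_self,
            if_neg (show ¬ (k + 1 < xs.length + 1) by omega), ite_self]
        · have hm : min (step - 1) xs.length = step - 1 := by omega
          rw [hm] at hk ⊢
          have hidx : step - 1 + (k - (step - 1)) = k := by omega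
          have hmod : (k - (step - 1)) % step = (k + 1) % step := by
            conv_rhs => rw [show k + 1 = step + (k - (step - 1)) by omega]
            rw [Nat.add_mod_left]
          rw [hidx, hmod]
          split
          · rfl
          · split <;> [rw [if_pos (by omega)]; rw [if_neg (by omega)]]

-- the two branches agree for any positive step once the list is nonempty
lemma pv_key (labels : List String) (step : Nat) (hstep : 1 ≤ step) (hne : 0 < labels.length) :
    ((PySem.List.enumerate labels 0).map (fun p =>
        if PySem.Int.mod p.1 (step : Int) == 0 || p.1 == (labels.length : Int) - 1 then p.2 else ""))
    = ((pvChunkGo step labels).set ((pvChunkGo step labels).length - 1)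
        (labels.getD (labels.length - 1) "")) := by
  apply List.ext_getElem?
  intro j
  rw [List.getElem?_map, PySem.List.getElem?_enumerate, pvChunkGo_length,
    List.getElem?_set, pvChunkGo_length, pvChunkGo_getElem? step hstep]
  by_cases hj : j < labels.length
  · have hjget : labels[j]? = some labels[j] := List.getElem?_eq_getElem hj
    by_cases hlast : j = labels.length - 1
    · rw [if_pos hlast.symm, if_pos (by omega)]
      rw [hjget]
      simp only [Option.map_some, zero_add]
      rw [if_pos (by simp only [beq_iff_eq, Bool.or_eq_true]; right; omega),
        ← hlast, List.getD_eq_getElem labels "" hj]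
    · rw [if_neg (fun h => hlast h.symm)]
      by_cases hdvd : j % step = 0
      · rw [if_pos hdvd, hjget]
        simp only [Option.map_some, zero_add]
        rw [if_pos]
        simp only [beq_iff_eq, Bool.or_eq_true]
        left
        rw [PySem.Int.mod_eq_zero_iff_dvd, Int.natCast_dvd_natCast]
        exact (Nat.dvd_of_mod_eq_zero hdvd)
      · rw [if_neg hdvd, if_pos hj, hjget]
        simp only [Option.map_some, zero_add]
        rw [if_neg]
        simp only [beq_iff_eq, Bool.or_eq_true, not_or]
        constructor
        · rw [PySem.Int.mod_eq_zero_iff_dvd, Int.natCast_dvd_natCast]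
          exact fun h => hdvd (Nat.mod_eq_zero_of_dvd h)
        · omega
  · rw [if_neg (show ¬ (labels.length - 1 = j) by omega),
      List.getElem?_eq_none (show labels.length ≤ j by omega), if_neg hj, ite_self]
    simp

-- ===== VERDICT (by name: the statement is the Claim_ definition above) =====
theorem sparsify_month_labels_py_spec : Claim_equal_sparsify_month_labels_py := by
  intro labels _
  show sparsify_month_labels_py labels = sparsify_month_labels_py_alt labels
  unfold sparsify_month_labels_py sparsify_month_labels_py_alt
  by_cases h12 : (labels.length : Int) ≤ 12
  · rw [if_pos h12, if_pos h12]
  · rw [if_neg h12, if_neg h12]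
    have hne : 0 < labels.length := by omega
    by_cases h16 : (labels.length : Int) ≤ 16
    · simpa [h16] using pv_key labels 2 (by norm_num) hne
    · by_cases h24 : (labels.length : Int) ≤ 24
      · simpa [h16, h24] using pv_key labels 3 (by norm_num) hne
      · simpa [h16, h24] using pv_key labels 4 (by norm_num) hne
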